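-- pv_equiv track=rewrite | github.com/mailhexu/pyDFTutils | pyDFTutils/phonon/plot_phon_nc.py | colordict_elem_to_atom
-- ===== SOURCE A (Python) =====
-- def colordict_elem_to_atom(colordict_elem, symbols):
--     """
--     colordict_elem: color-elem pair dictionary
--     symbols: symbols of atoms
--     """
--     cdict = {}
--     for color in colordict_elem:
--         cdict[color] = []
--     rdict = dict(zip(colordict_elem.values(), colordict_elem.keys()))
--     for i, symbol in enumerate(symbols):
--         if symbol in rdict:
--             cdict[rdict[symbol]].append(i)
--     return cdict
-- ===== SOURCE B (Python) =====
-- def colordict_elem_to_atom(colordict_elem, symbols):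
--     """
--     colordict_elem: color-elem pair dictionary
--     symbols: symbols of atoms
--     """
--     index_map = {}
--     for i, symbol in enumerate(symbols):
--         index_map.setdefault(symbol, []).append(i)
--     rdict = {elem: color for color, elem in colordict_elem.items()}
--     cdict = {color: [] for color in colordict_elem}
--     for elem, color in rdict.items():
--         if elem in index_map:
--             cdict[color] = index_map[elem]
--     return cdict
-- ===== Notes on version B (the rewrite author's own statement) =====
-- stated objective: alternative
-- what changed: Instead of appending each atom index into the color dict while scanning symbols, B first groups symbol->indices in one pass (index_map), then assigns each color its element's whole index list by iterating rdict.items(); the per-symbol dict-update loop on cdict disappears.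
import Mathlib
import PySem

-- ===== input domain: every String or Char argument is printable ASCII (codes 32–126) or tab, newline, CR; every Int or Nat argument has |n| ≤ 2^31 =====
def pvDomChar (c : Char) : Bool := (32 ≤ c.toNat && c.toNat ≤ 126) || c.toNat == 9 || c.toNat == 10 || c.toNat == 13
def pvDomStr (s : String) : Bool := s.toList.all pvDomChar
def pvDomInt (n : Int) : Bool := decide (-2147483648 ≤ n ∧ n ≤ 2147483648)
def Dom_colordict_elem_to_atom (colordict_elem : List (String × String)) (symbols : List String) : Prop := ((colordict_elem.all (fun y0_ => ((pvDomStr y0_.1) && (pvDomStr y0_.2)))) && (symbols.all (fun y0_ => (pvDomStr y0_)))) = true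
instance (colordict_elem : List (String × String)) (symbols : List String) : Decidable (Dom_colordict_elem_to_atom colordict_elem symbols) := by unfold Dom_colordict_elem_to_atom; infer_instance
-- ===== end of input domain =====

-- B replaces A's per-symbol append-into-cdict loop by one grouping pass (symbol -> index list)
-- followed by whole-list assignments per rdict entry; alternative decomposition, same asymptotic cost.

-- ===== PORT A =====
def colordict_elem_to_atom (colordict_elem : List (String × String)) (symbols : List String) : List (String × List Int) :=
  let d := PySem.Dict.ofList colordict_elem
  -- cdict = {}; for color in colordict_elem: cdict[color] = []
  let cdict := d.keys.foldl (fun c color => c.insert color ([] : List Int)) PySem.Dict.empty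
  -- rdict = dict(zip(colordict_elem.values(), colordict_elem.keys()))
  let rdict := (d.values.zip d.keys).foldl (fun r p => r.insert p.1 p.2) PySem.Dict.empty
  -- for i, symbol in enumerate(symbols): if symbol in rdict: cdict[rdict[symbol]].append(i)
  let cdict := (PySem.List.enumerate symbols 0).foldl
    (fun c p => if rdict.contains p.2 then c.modify (rdict.getD p.2 "") [] (fun x => x ++ [p.1]) else c) cdict
  cdict.items

-- ===== PORT B =====
def colordict_elem_to_atom_alt (colordict_elem : List (String × String)) (symbols : List String) : List (String × List Int) :=
  let d := PySem.Dict.ofList colordict_elem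
  -- index_map: one grouping pass over symbols (setdefault(symbol, []).append(i))
  let imap := (PySem.List.enumerate symbols 0).foldl
    (fun m p => m.modify p.2 [] (fun x => x ++ [p.1])) PySem.Dict.empty
  -- rdict = {elem: color for color, elem in colordict_elem.items()}
  let rdict := d.items.foldl (fun r p => r.insert p.2 p.1) PySem.Dict.empty
  -- cdict = {color: [] for color in colordict_elem}
  let cdict := d.keys.foldl (fun c color => c.insert color ([] : List Int)) PySem.Dict.empty
  -- for elem, color in rdict.items(): if elem in index_map: cdict[color] = index_map[elem]
  let cdict := rdict.items.foldl
    (fun c p => if imap.contains p.1 then c.insert p.2 (imap.getD p.1 ([] : List Int)) else c) cdict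
  cdict.items

-- ===== PRECONDITION & SPEC =====
def Spec_colordict_elem_to_atom (colordict_elem : List (String × String)) (symbols : List String) (out : List (String × List Int)) : Prop := out = colordict_elem_to_atom_alt colordict_elem symbols
instance (colordict_elem : List (String × String)) (symbols : List String) (out : List (String × List Int)) : Decidable (Spec_colordict_elem_to_atom colordict_elem symbols out) := by unfold Spec_colordict_elem_to_atom; infer_instance

-- ===== CLAIM (what is proved, stated in full; the proofs are below) =====
def Claim_equal_colordict_elem_to_atom : Prop := ∀ (colordict_elem : List (String × String)) (symbols : List String), Dom_colordict_elem_to_atom colordict_elem symbols → Spec_colordict_elem_to_atom colordict_elem symbols (colordict_elem_to_atom colordict_elem symbols)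

-- ===== LEMMAS AND PROOFS =====

-- two pairs with the same first component in a fst-Nodup list are equal
theorem pv_eq_of_mem_nodup_fst {α β : Type} {l : List (α × β)} (h : (l.map Prod.fst).Nodup)
    {p q : α × β} (hp : p ∈ l) (hq : q ∈ l) (hfst : p.1 = q.1) : p = q := by
  induction l with
  | nil => cases hp
  | cons x t ih =>
    simp only [List.map_cons, List.nodup_cons] at h
    rcases List.mem_cons.mp hp with rfl | hp' <;> rcases List.mem_cons.mp hq with rfl | hq'
    · rfl
    · exact absurd (hfst ▸ List.mem_map_of_mem hq') h.1
    · exact absurd (hfst ▸ List.mem_map_of_mem hp') h.1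
    · exact ih h.2 hp' hq'

-- the reversed-insert dict: get? is the LAST pair with that second component
theorem pv_get?_foldl_insert_swap (l : List (String × String)) (r0 : PySem.Dict String String) (e : String) :
    (l.foldl (fun r p => r.insert p.2 p.1) r0).get? e =
      match l.reverse.find? (fun p => p.2 == e) with
      | some p => some p.1
      | none => r0.get? e := by
  induction l generalizing r0 with
  | nil => simp
  | cons p t ih =>
    simp only [List.foldl_cons, List.reverse_cons, List.find?_append]
    rw [ih]
    cases hf : t.reverse.find? (fun q => q.2 == e) with
    | some q => simp
    | none =>
      simp only [Option.none_or]
      by_cases he : p.2 = e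
      · subst he; simp [PySem.Dict.get?_insert_self]
      · have : (p.2 == e) = false := beq_false_of_ne he
        simp [this, PySem.Dict.get?_insert_of_ne _ _ (Ne.symm he)]

-- A's symbol loop: value at color c is the appended indices of symbols mapping to c
theorem pv_aloop_getD (r : PySem.Dict String String) (l : List (Int × String))
    (c0 : PySem.Dict String (List Int)) (c : String) :
    (l.foldl (fun cd p => if r.contains p.2 then cd.modify (r.getD p.2 "") [] (fun x => x ++ [p.1]) else cd) c0).getD c []
      = c0.getD c [] ++ (l.filter (fun p => r.get? p.2 == some c)).map (fun p => p.1) := by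
  induction l generalizing c0 with
  | nil => simp
  | cons p t ih =>
    simp only [List.foldl_cons, List.filter_cons]
    cases hg : r.get? p.2 with
    | none =>
      have hc : r.contains p.2 = false := (PySem.Dict.get?_eq_none_iff_contains r p.2).mp hg
      simp [hc, ih]
    | some v =>
      have hc : r.contains p.2 = true := by
        rw [PySem.Dict.contains_eq_isSome_get?, hg]; rfl
      have hgd : r.getD p.2 "" = v := PySem.Dict.getD_of_get?_eq_some r "" hg
      by_cases hvc : v = c
      · subst hvc
        simp only [hc, if_true, hgd, ih, beq_self_eq_true, if_true]
        rw [PySem.Dict.getD_modify]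
        simp
      · have : (some v == some c) = false := by
          simp [hvc]
        simp only [hc, if_true, hgd, ih, this, if_neg Bool.false_ne_true]
        rw [PySem.Dict.getD_modify]
        simp [Ne.symm hvc]

-- A's symbol loop never adds keys when every rdict value is already a key
theorem pv_aloop_keys (r : PySem.Dict String String) (l : List (Int × String))
    (c0 : PySem.Dict String (List Int)) (h : ∀ v ∈ r.values, v ∈ c0.keys) :
    (l.foldl (fun cd p => if r.contains p.2 then cd.modify (r.getD p.2 "") [] (fun x => x ++ [p.1]) else cd) c0).keys
      = c0.keys := by
  induction l generalizing c0 with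
  | nil => rfl
  | cons p t ih =>
    simp only [List.foldl_cons]
    by_cases hc : r.contains p.2 = true
    · cases hg : r.get? p.2 with
      | none => rw [PySem.Dict.get?_eq_none_iff_contains] at hg; simp [hg] at hc
      | some v =>
        have hgd : r.getD p.2 "" = v := PySem.Dict.getD_of_get?_eq_some r "" hg
        have hvmem : v ∈ r.values := by
          have : (p.2, v) ∈ r.items := PySem.Dict.mem_items_of_get?_eq_some r hg
          exact List.mem_map_of_mem this
        have hkeys : (c0.modify (r.getD p.2 "") [] (fun x => x ++ [p.1])).keys = c0.keys := by
          rw [PySem.Dict.keys_modify, PySem.Dict.keys_insert_of_contains]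
          rw [hgd, PySem.Dict.contains_iff_mem_keys]
          exact h v hvmem
        simp only [hc, if_true]
        rw [ih _ (fun w hw => hkeys ▸ h w hw), hkeys]
    · simp only [Bool.not_eq_true] at hc
      simp only [hc, Bool.false_eq_true, if_false]
      exact ih c0 h

-- B's assignment loop leaves a color untouched when no entry carries it
theorem pv_bloop_untouched (im : PySem.Dict String (List Int)) (l : List (String × String))
    (c0 : PySem.Dict String (List Int)) (c : String) (h : ∀ p ∈ l, p.2 ≠ c) :
    (l.foldl (fun cd p => if im.contains p.1 then cd.insert p.2 (im.getD p.1 []) else cd) c0).getD c []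
      = c0.getD c [] := by
  induction l generalizing c0 with
  | nil => rfl
  | cons p t ih =>
    simp only [List.foldl_cons]
    by_cases hc : im.contains p.1 = true
    · simp only [hc, if_true]
      rw [ih _ (fun q hq => h q (List.mem_cons_of_mem _ hq))]
      rw [PySem.Dict.getD_insert]
      simp [Ne.symm (h p (List.mem_cons_self))]
    · simp only [Bool.not_eq_true] at hc
      simp only [hc, Bool.false_eq_true, if_false]
      exact ih c0 (fun q hq => h q (List.mem_cons_of_mem _ hq))

-- B's assignment loop: value at color c is decided by the unique entry carrying c
theorem pv_bloop_getD (im : PySem.Dict String (List Int)) (l : List (String × String))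
    (c0 : PySem.Dict String (List Int)) (c : String)
    (hk : (l.map Prod.fst).Nodup)
    (hp : ∀ p ∈ l, ∀ q ∈ l, p.2 = c → q.2 = c → p = q) :
    (l.foldl (fun cd p => if im.contains p.1 then cd.insert p.2 (im.getD p.1 []) else cd) c0).getD c []
      = match l.find? (fun p => p.2 == c) with
        | some p => if im.contains p.1 then im.getD p.1 [] else c0.getD c []
        | none => c0.getD c [] := by
  induction l generalizing c0 with
  | nil => rfl
  | cons p t ih =>
    simp only [List.map_cons, List.nodup_cons] at hk
    simp only [List.foldl_cons, List.find?_cons]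
    by_cases hpc : p.2 = c
    · have hb : (p.2 == c) = true := beq_iff_eq.mpr hpc
      simp only [hb]
      have hnone : ∀ q ∈ t, q.2 ≠ c := by
        intro q hq hqc
        have : p = q := hp p List.mem_cons_self q (List.mem_cons_of_mem _ hq) hpc hqc
        exact hk.1 (this ▸ List.mem_map_of_mem hq)
      by_cases hc : im.contains p.1 = true
      · simp only [hc, if_true]
        rw [pv_bloop_untouched _ _ _ _ hnone, PySem.Dict.getD_insert]
        simp [hpc]
      · simp only [Bool.not_eq_true] at hc
        simp only [hc, Bool.false_eq_true, if_false]
        exact pv_bloop_untouched _ _ _ _ hnone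
    · have hb : (p.2 == c) = false := beq_false_of_ne hpc
      simp only [hb]
      have hrec := ih (if im.contains p.1 then c0.insert p.2 (im.getD p.1 []) else c0) hk.2
        (fun a ha b hb' hac hbc => hp a (List.mem_cons_of_mem _ ha) b (List.mem_cons_of_mem _ hb') hac hbc)
      by_cases hc : im.contains p.1 = true
      · simp only [hc, if_true] at hrec ⊢
        rw [hrec]
        have hins : (c0.insert p.2 (im.getD p.1 [])).getD c [] = c0.getD c [] := by
          rw [PySem.Dict.getD_insert]; simp [Ne.symm hpc]
        cases t.find? (fun q => q.2 == c) <;> simp [hins]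
      · simp only [Bool.not_eq_true] at hc
        simp only [hc, Bool.false_eq_true, if_false] at hrec ⊢
        exact hrec

-- the init loop: every color's value starts as []
theorem pv_init_getD (ks : List String) (m0 : PySem.Dict String (List Int)) (c : String)
    (h : m0.getD c [] = []) :
    (ks.foldl (fun m k => m.insert k ([] : List Int)) m0).getD c [] = [] := by
  induction ks generalizing m0 with
  | nil => exact h
  | cons k t ih =>
    simp only [List.foldl_cons]
    apply ih
    rw [PySem.Dict.getD_insert]
    simp [h]


-- B's keys-init loop produces exactly the distinct colors
theorem pv_init_keys (ks : List String) :
    (ks.foldl (fun c color => c.insert color ([] : List Int)) PySem.Dict.empty).keys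
      = PySem.Set.ofList ks := by
  rw [PySem.Dict.keys_foldl_insert ks (fun _ _ => ([] : List Int)), PySem.Dict.keys_empty]
  rw [show ([] : List String) = PySem.Set.empty from rfl, PySem.Set.update_empty]

-- B's assignment loop never adds keys when every target color is already a key
theorem pv_bloop_keys (im : PySem.Dict String (List Int)) (l : List (String × String))
    (c0 : PySem.Dict String (List Int)) (h : ∀ p ∈ l, p.2 ∈ c0.keys) :
    (l.foldl (fun cd p => if im.contains p.1 then cd.insert p.2 (im.getD p.1 []) else cd) c0).keys
      = c0.keys := by
  induction l generalizing c0 with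
  | nil => rfl
  | cons p t ih =>
    simp only [List.foldl_cons]
    by_cases hc : im.contains p.1 = true
    · have hk : (c0.insert p.2 (im.getD p.1 [])).keys = c0.keys :=
        PySem.Dict.keys_insert_of_contains _ _
          ((PySem.Dict.contains_iff_mem_keys _ _).mpr (h p List.mem_cons_self))
      simp only [hc, if_true]
      rw [ih _ (fun q hq => hk ▸ h q (List.mem_cons_of_mem _ hq)), hk]
    · simp only [Bool.not_eq_true] at hc
      simp only [hc, Bool.false_eq_true, if_false]
      exact ih c0 (fun q hq => h q (List.mem_cons_of_mem _ hq))

-- A's rdict (over zip(values, keys)) is B's rdict (over items, swapped)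
theorem pv_rdicts_eq (d : PySem.Dict String String) :
    (d.values.zip d.keys).foldl (fun r p => r.insert p.1 p.2) PySem.Dict.empty
      = d.items.foldl (fun r p => r.insert p.2 p.1) PySem.Dict.empty := by
  simp only [PySem.Dict.values, PySem.Dict.keys]
  rw [List.zip_map', List.foldl_map]

-- index_map value: the indices of symbol e, in order
theorem pv_imap_getD (symbols : List String) (e : String) :
    ((PySem.List.enumerate symbols 0).foldl
        (fun m p => m.modify p.2 [] (fun x => x ++ [p.1])) PySem.Dict.empty).getD e []
      = ((PySem.List.enumerate symbols 0).filter (fun p => p.2 == e)).map (fun p => p.1) := by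
  have h : ((PySem.List.enumerate symbols 0).foldl
        (fun m p => m.modify p.2 [] (fun x => x ++ [p.1])) PySem.Dict.empty)
      = ((PySem.List.enumerate symbols 0).map (fun p => (p.2, p.1))).foldl
          (fun m q => m.modify q.1 [] (fun x => x ++ [q.2])) PySem.Dict.empty := by
    rw [List.foldl_map]
  rw [h, PySem.Dict.getD_foldl_modify_append]
  simp [List.filter_map, Function.comp_def]

-- the two ports agree on every input
theorem pv_main (ce : List (String × String)) (symbols : List String) :
    colordict_elem_to_atom ce symbols = colordict_elem_to_atom_alt ce symbols := by
  simp only [colordict_elem_to_atom, colordict_elem_to_atom_alt]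
  rw [pv_rdicts_eq]
  set d := PySem.Dict.ofList ce with hd
  set rdict := d.items.foldl (fun r p => r.insert p.2 p.1) PySem.Dict.empty with hr
  set imap := (PySem.List.enumerate symbols 0).foldl
      (fun m p => m.modify p.2 [] (fun x => x ++ [p.1])) PySem.Dict.empty with him
  set c0 := d.keys.foldl (fun c color => c.insert color ([] : List Int)) PySem.Dict.empty with hc0
  have hnd : d.keys.Nodup := PySem.Dict.nodup_keys_ofList ce
  have hkeys0 : c0.keys = d.keys := by
    rw [hc0, pv_init_keys]; exact PySem.Set.ofList_eq_self_of_nodup _ hnd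
  have hrk : rdict.keys.Nodup := by
    rw [hr]
    exact PySem.Dict.nodup_keys_foldl_insert_key _ (fun p : String × String => p.2)
      (fun _ p => p.1) _ PySem.Dict.nodup_keys_empty
  have hdfst : d.items.map Prod.fst = d.keys := by simp only [PySem.Dict.keys]
  have hrfst : rdict.items.map Prod.fst = rdict.keys := by simp only [PySem.Dict.keys]
  have hget : ∀ {e c : String}, rdict.get? e = some c → (c, e) ∈ d.items := by
    intro e c hg
    rw [hr, pv_get?_foldl_insert_swap] at hg
    cases hf : (d.items.reverse.find? (fun p => p.2 == e)) with
    | none => rw [hf] at hg; simp [PySem.Dict.get?_empty] at hg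
    | some p =>
      rw [hf] at hg
      have h1 : p.1 = c := by simpa using hg
      have h2 : p.2 = e := by simpa using List.find?_some hf
      have h3 : p ∈ d.items := List.mem_reverse.mp (List.mem_of_find?_eq_some hf)
      obtain ⟨a, b⟩ := p
      simp only at h1 h2
      subst h1; subst h2
      exact h3
  have huniq : ∀ {e e' c : String}, rdict.get? e = some c → rdict.get? e' = some c → e = e' := by
    intro e e' c h1 h2
    have := pv_eq_of_mem_nodup_fst (l := d.items) (hdfst ▸ hnd) (hget h1) (hget h2) rfl
    exact congrArg Prod.snd this
  have hvals : ∀ p ∈ rdict.items, p.2 ∈ d.keys := by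
    intro p hp
    have hg : rdict.get? p.1 = some p.2 :=
      PySem.Dict.get?_of_mem_items rdict (by simpa using hp) hrk
    exact PySem.Dict.mem_keys_of_mem_items d (hget hg)
  have hpuniq : ∀ c : String, ∀ p ∈ rdict.items, ∀ q ∈ rdict.items, p.2 = c → q.2 = c → p = q := by
    intro c p hp q hq hpc hqc
    have hgp : rdict.get? p.1 = some c := by
      have := PySem.Dict.get?_of_mem_items rdict (k := p.1) (v := p.2) (by simpa using hp) hrk
      rw [hpc] at this; exact this
    have hgq : rdict.get? q.1 = some c := by
      have := PySem.Dict.get?_of_mem_items rdict (k := q.1) (v := q.2) (by simpa using hq) hrk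
      rw [hqc] at this; exact this
    exact pv_eq_of_mem_nodup_fst (hrfst ▸ hrk) hp hq (huniq hgp hgq)
  have h0 : ∀ c : String, c0.getD c [] = [] := by
    intro c; rw [hc0]; exact pv_init_getD _ _ _ (PySem.Dict.getD_empty _ _)
  have him_getD : ∀ x : String, imap.getD x [] =
      ((PySem.List.enumerate symbols 0).filter (fun p => p.2 == x)).map (fun p => p.1) := by
    intro x; rw [him]; exact pv_imap_getD symbols x
  -- per-color equality of the two final dict values
  have hcol : ∀ c ∈ d.keys,
      ((PySem.List.enumerate symbols 0).foldl
        (fun cd p => if rdict.contains p.2 then cd.modify (rdict.getD p.2 "") [] (fun x => x ++ [p.1]) else cd) c0).getD c []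
      = (rdict.items.foldl
        (fun cd p => if imap.contains p.1 then cd.insert p.2 (imap.getD p.1 []) else cd) c0).getD c [] := by
    intro c _
    rw [pv_aloop_getD, pv_bloop_getD imap rdict.items c0 c (hrfst ▸ hrk) (hpuniq c), h0 c]
    simp only [List.nil_append]
    cases hf : rdict.items.find? (fun p => p.2 == c) with
    | some p =>
      have hpm : p ∈ rdict.items := List.mem_of_find?_eq_some hf
      have hpc : p.2 = c := by simpa using List.find?_some hf
      have hge : rdict.get? p.1 = some c := by
        have := PySem.Dict.get?_of_mem_items rdict (k := p.1) (v := p.2) (by simpa using hpm) hrk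
        rw [hpc] at this; exact this
      have hfe : ∀ q ∈ PySem.List.enumerate symbols 0,
          (rdict.get? q.2 == some c) = (q.2 == p.1) := by
        intro q _
        by_cases he : q.2 = p.1
        · rw [he, hge]; simp
        · have hne : rdict.get? q.2 ≠ some c := fun hgq => he (huniq hgq hge)
          simp [hne, he]
      rw [List.filter_congr hfe, ← him_getD p.1]
      by_cases hcp : imap.contains p.1 = true
      · simp [hcp]
      · have hz : imap.getD p.1 [] = [] :=
          PySem.Dict.getD_of_not_contains _ _ (Bool.not_eq_true _ ▸ hcp)
        simp [hcp, hz]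
    | none =>
      have hnone : ∀ q ∈ PySem.List.enumerate symbols 0,
          ¬ ((rdict.get? q.2 == some c) = true) := by
        intro q _ hb
        have hgq : rdict.get? q.2 = some c := by simpa using hb
        have hmem : (q.2, c) ∈ rdict.items := PySem.Dict.mem_items_of_get?_eq_some rdict hgq
        have := List.find?_eq_none.mp hf _ hmem
        simp at this
      rw [List.filter_eq_nil_iff.mpr hnone]
      simp
  -- keys of both final dicts are the original colors
  have hAk : ((PySem.List.enumerate symbols 0).foldl
      (fun cd p => if rdict.contains p.2 then cd.modify (rdict.getD p.2 "") [] (fun x => x ++ [p.1]) else cd) c0).keys = c0.keys := by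
    apply pv_aloop_keys
    intro v hv
    simp only [PySem.Dict.values] at hv
    obtain ⟨p, hp, rfl⟩ := List.mem_map.mp hv
    exact hkeys0 ▸ hvals p hp
  have hBk : (rdict.items.foldl
      (fun cd p => if imap.contains p.1 then cd.insert p.2 (imap.getD p.1 []) else cd) c0).keys = c0.keys := by
    apply pv_bloop_keys
    intro p hp
    exact hkeys0 ▸ hvals p hp
  rw [PySem.Dict.items_eq_map_keys _ (by rw [hAk, hkeys0]; exact hnd) ([] : List Int),
      PySem.Dict.items_eq_map_keys _ (by rw [hBk, hkeys0]; exact hnd) ([] : List Int),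
      hAk, hBk]
  apply List.map_congr_left
  intro c hcm
  exact congrArg (Prod.mk c) (hcol c (hkeys0 ▸ hcm))

-- ===== VERDICT (by name: the statement is the Claim_ definition above) =====
theorem colordict_elem_to_atom_spec : Claim_equal_colordict_elem_to_atom := by
  intro ce symbols _
  exact pv_main ce symbols
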